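-- pv_equiv track=rewrite | github.com/mohammadfaiizan/ProjectI | DSA/Problem/Trie/07_Competitive_Programming/Graph_Algorithms_with_Trie.py | graph_traversal_pattern_matching
-- ===== SOURCE A (Python) =====
-- from typing import List, Dict, Set, Tuple, Optional
--
-- class TrieNode:
--     def __init__(self):
--         self.children = {}
--         self.is_end = False
--         self.node_id = -1
--
-- def graph_traversal_pattern_matching(graph: Dict[int, List[int]],
--                                    node_labels: Dict[int, str],
--                                    patterns: List[str]) -> Dict[str, List[List[int]]]:
--     """
--     Find all paths that match given patterns during traversal
--     Time: O(V + E) * paths * pattern_length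
--     Space: O(V + patterns)
--     """
--     # Build pattern tries
--     pattern_tries = {}
--     for pattern in patterns:
--         root = TrieNode()
--         node = root
--         for char in pattern:
--             if char not in node.children:
--                 node.children[char] = TrieNode()
--             node = node.children[char]
--         node.is_end = True
--         pattern_tries[pattern] = root
--
--     result = {pattern: [] for pattern in patterns}
--
--     def dfs(node: int, path: List[int], trie_states: Dict[str, TrieNode]):
--         """DFS with pattern matching state"""
--         current_label = node_labels.get(node, "")
--
--         # Update trie states for each pattern
--         new_trie_states = {}
--         for pattern, trie_pos in trie_states.items():
--             new_pos = trie_pos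
--
--             for char in current_label:
--                 if char in new_pos.children:
--                     new_pos = new_pos.children[char]
--                 else:
--                     new_pos = pattern_tries[pattern]  # Reset
--                     break
--
--             new_trie_states[pattern] = new_pos
--
--             # Check if pattern is complete
--             if new_pos.is_end:
--                 result[pattern].append(path[:])
--
--         # Continue DFS
--         for neighbor in graph.get(node, []):
--             if neighbor not in path:  # Avoid cycles
--                 dfs(neighbor, path + [neighbor], new_trie_states)
--
--     # Start DFS from each node
--     for start_node in graph:
--         initial_states = {pattern: trie for pattern, trie in pattern_tries.items()}
--         dfs(start_node, [start_node], initial_states)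
--
--     return result
-- ===== SOURCE B (Python) =====
-- def graph_traversal_pattern_matching(graph, node_labels, patterns):
--     """Per-pattern DFS with an integer matched-prefix position instead of tries
--     and a combined dict of trie-node states."""
--     def advance(pattern, pos, label):
--         m = len(pattern)
--         for ch in label:
--             if pos < m and pattern[pos] == ch:
--                 pos += 1
--             else:
--                 return 0  # mismatch: reset to start and stop scanning
--         return pos
--
--     def search(pattern):
--         out = []
--         def dfs(node, path, pos):
--             pos = advance(pattern, pos, node_labels.get(node, ""))
--             if pos == len(pattern):
--                 out.append(path)
--             for nb in graph.get(node, []):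
--                 if nb not in path:
--                     dfs(nb, path + [nb], pos)
--         for start in graph:
--             dfs(start, [start], 0)
--         return out
--
--     return {p: search(p) for p in patterns}
-- ===== Notes on version B (the rewrite author's own statement) =====
-- stated objective: simpler
-- what changed: Replaces the per-pattern tries and the single DFS threading a dict of trie-node states with one independent DFS per pattern that tracks only an integer matched-prefix position, collecting matches by list concatenation instead of mutating a shared result dict.
import Mathlib
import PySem

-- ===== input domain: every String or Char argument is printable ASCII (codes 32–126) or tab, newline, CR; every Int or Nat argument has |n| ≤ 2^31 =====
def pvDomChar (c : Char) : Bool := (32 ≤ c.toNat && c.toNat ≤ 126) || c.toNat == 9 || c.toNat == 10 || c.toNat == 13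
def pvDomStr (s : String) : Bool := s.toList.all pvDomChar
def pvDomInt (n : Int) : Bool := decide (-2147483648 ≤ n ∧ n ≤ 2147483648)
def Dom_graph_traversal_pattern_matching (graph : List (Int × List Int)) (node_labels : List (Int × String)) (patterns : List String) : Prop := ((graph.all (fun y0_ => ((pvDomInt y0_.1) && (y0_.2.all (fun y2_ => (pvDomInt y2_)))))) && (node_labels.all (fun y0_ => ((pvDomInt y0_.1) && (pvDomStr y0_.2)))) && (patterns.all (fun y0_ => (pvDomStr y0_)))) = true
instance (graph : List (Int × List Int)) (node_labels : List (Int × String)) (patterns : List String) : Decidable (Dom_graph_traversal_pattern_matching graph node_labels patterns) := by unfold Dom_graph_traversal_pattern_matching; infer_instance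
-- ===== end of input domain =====

-- B replaces A's per-pattern tries and single DFS threading a dict of trie-node states by one
-- independent DFS per pattern tracking only an integer matched-prefix position (objective: simpler).

-- ===== PORT A =====
-- A trie node: (children dict, is_end flag).  Python's TrieNode objects form a heap graph that a
-- Lean inductive cannot mirror directly (nested inductive), so the standard index/arena encoding is
-- used: an arena is the list of nodes created so far, a node reference is its index in that list
-- (the root is index 0, nodes are appended in creation order).  Every step of A's code is kept.
def pvNode0 : PySem.Dict Char Nat × Bool := (PySem.Dict.empty, false)

-- 'for char in pattern: if char not in node.children: node.children[char] = TrieNode(); node = node.children[char]'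
def pvBuildStep (st : List (PySem.Dict Char Nat × Bool) × Nat) (c : Char) :
    List (PySem.Dict Char Nat × Bool) × Nat :=
  let node := st.1.getD st.2 pvNode0
  match node.1.get? c with
  | some idx => (st.1, idx)
  | none =>
      let newIdx := st.1.length                      -- fresh TrieNode() appended to the arena
      ((st.1 ++ [pvNode0]).set st.2 (node.1.insert c newIdx, node.2), newIdx)

-- builds one pattern's trie and sets 'node.is_end = True' on the final node
def pvBuildTrie (p : String) : List (PySem.Dict Char Nat × Bool) :=
  let st := p.toList.foldl pvBuildStep ([pvNode0], 0)
  st.1.set st.2 ((st.1.getD st.2 pvNode0).1, true)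

-- 'for char in current_label: if char in new_pos.children: new_pos = … else: new_pos = root; break'
def pvStepChars (ar : List (PySem.Dict Char Nat × Bool)) (pos : Nat) : List Char → Nat
  | [] => pos
  | c :: rest =>
    match (ar.getD pos pvNode0).1.get? c with
    | some nxt => pvStepChars ar nxt rest
    | none => 0                                      -- reset to pattern_tries[pattern] (the root) and break

def pvAllNodes (graph : List (Int × List Int)) : List Int :=
  graph.map Prod.fst ++ (graph.map Prod.snd).flatten

-- every neighbour produced by 'graph.get(node, [])' lies in pvAllNodes (termination of the DFS)
theorem pvGetD_subset_allNodes (graph : List (Int × List Int)) (node x : Int)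
    (hx : x ∈ PySem.Dict.getD (PySem.Dict.mk graph) node []) : x ∈ pvAllNodes graph := by
  induction graph with
  | nil => simp [PySem.Dict.getD, PySem.Dict.get?] at hx
  | cons hd tl ih =>
      rw [PySem.Dict.getD_eq_get?_getD, PySem.Dict.get?_mk_cons] at hx
      by_cases h : hd.1 == node
      · simp [h] at hx
        simp [pvAllNodes, List.mem_append]
        tauto
      · simp only [h, Bool.false_eq_true, if_false] at hx
        rw [← PySem.Dict.getD_eq_get?_getD] at hx
        have := ih hx
        simp only [pvAllNodes, List.map_cons, List.flatten_cons, List.mem_append] at this ⊢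
        tauto

theorem pvMeasure_lt (graph : List (Int × List Int)) (path : List Int) (nb : Int)
    (hS : nb ∈ pvAllNodes graph) (hp : nb ∉ path) :
    ((pvAllNodes graph).filter (fun x => decide (x ∉ path ++ [nb]))).length <
      ((pvAllNodes graph).filter (fun x => decide (x ∉ path))).length := by
  have hsub : List.Sublist ((pvAllNodes graph).filter (fun x => decide (x ∉ path ++ [nb])))
      ((pvAllNodes graph).filter (fun x => decide (x ∉ path))) := by
    apply List.monotone_filter_right
    intro a ha
    simp only [decide_eq_true_eq, List.mem_append, List.mem_singleton] at *
    tauto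
  refine Nat.lt_of_le_of_ne hsub.length_le (fun hlen => ?_)
  have heq := hsub.eq_of_length hlen
  have h1 : nb ∈ (pvAllNodes graph).filter (fun x => decide (x ∉ path)) := by
    simp [List.mem_filter, hS, hp]
  rw [← heq] at h1
  simp [List.mem_filter] at h1

-- the recursive 'def dfs(node, path, trie_states)' (mutation of 'result' becomes the res argument)
def pvDfsA (graph : List (Int × List Int)) (node_labels : List (Int × String))
    (tries : PySem.Dict String (List (PySem.Dict Char Nat × Bool)))
    (node : Int) (path : List Int) (states : PySem.Dict String Nat)
    (res : PySem.Dict String (List (List Int))) : PySem.Dict String (List (List Int)) :=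
  let label := (PySem.Dict.getD (PySem.Dict.mk node_labels) node "").toList
  -- 'for pattern, trie_pos in trie_states.items(): …' building new_trie_states and appending matches
  let sr := states.items.foldl
    (fun (acc : PySem.Dict String Nat × PySem.Dict String (List (List Int))) pp =>
      let ar := tries.getD pp.1 []
      let newPos := pvStepChars ar pp.2 label
      let ns := acc.1.insert pp.1 newPos
      -- 'if new_pos.is_end: result[pattern].append(path[:])' (the key is always present in result)
      let r := if ((ar.getD newPos pvNode0).2 : Bool) then acc.2.modify pp.1 [] (fun v => v ++ [path]) else acc.2
      (ns, r)) (PySem.Dict.empty, res)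
  -- 'for neighbor in graph.get(node, []): if neighbor not in path: dfs(…)'
  (PySem.Dict.getD (PySem.Dict.mk graph) node []).attach.foldl
    (fun r nb =>
      if _h : nb.1 ∈ path then r
      else pvDfsA graph node_labels tries nb.1 (path ++ [nb.1]) sr.1 r) sr.2
termination_by ((pvAllNodes graph).filter (fun x => decide (x ∉ path))).length
decreasing_by exact pvMeasure_lt graph path nb.1 (pvGetD_subset_allNodes graph node nb.1 nb.2) _h

def graph_traversal_pattern_matching (graph : List (Int × List Int))
    (node_labels : List (Int × String)) (patterns : List String) :
    List (String × List (List Int)) :=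
  -- 'pattern_tries = {}; for pattern in patterns: … pattern_tries[pattern] = root'
  let tries := patterns.foldl
    (fun (d : PySem.Dict String (List (PySem.Dict Char Nat × Bool))) p => d.insert p (pvBuildTrie p))
    PySem.Dict.empty
  -- 'result = {pattern: [] for pattern in patterns}'
  let res0 := patterns.foldl
    (fun (d : PySem.Dict String (List (List Int))) p => d.insert p []) PySem.Dict.empty
  -- 'for start_node in graph: initial_states = {pattern: trie for …}; dfs(start_node, [start_node], initial_states)'
  -- (each pattern's initial state is that trie's root, i.e. arena index 0)
  (graph.foldl
    (fun res st =>
      let initStates := PySem.Dict.mk (tries.items.map (fun pt => (pt.1, 0)))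
      pvDfsA graph node_labels tries st.1 [st.1] initStates res) res0).items

-- ===== PORT B =====
-- 'def advance(pattern, pos, label)'
def pvAdvance (p : List Char) (pos : Nat) : List Char → Nat
  | [] => pos
  | c :: rest =>
      if h : pos < p.length then
        if p[pos] = c then pvAdvance p (pos + 1) rest else 0
      else 0

-- 'def dfs(node, path, pos)' (mutation of the enclosing 'out' becomes the out argument)
def pvDfsB (graph : List (Int × List Int)) (node_labels : List (Int × String)) (p : List Char)
    (node : Int) (path : List Int) (pos : Nat) (out : List (List Int)) : List (List Int) :=
  let pos' := pvAdvance p pos (PySem.Dict.getD (PySem.Dict.mk node_labels) node "").toList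
  let out := if pos' = p.length then out ++ [path] else out
  (PySem.Dict.getD (PySem.Dict.mk graph) node []).attach.foldl
    (fun out nb =>
      if _h : nb.1 ∈ path then out
      else pvDfsB graph node_labels p nb.1 (path ++ [nb.1]) pos' out) out
termination_by ((pvAllNodes graph).filter (fun x => decide (x ∉ path))).length
decreasing_by exact pvMeasure_lt graph path nb.1 (pvGetD_subset_allNodes graph node nb.1 nb.2) _h

-- 'def search(pattern)'
def pvSearchB (graph : List (Int × List Int)) (node_labels : List (Int × String)) (p : String) :
    List (List Int) :=
  graph.foldl (fun out st => pvDfsB graph node_labels p.toList st.1 [st.1] 0 out) []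

-- 'return {p: search(p) for p in patterns}'
def graph_traversal_pattern_matching_alt (graph : List (Int × List Int))
    (node_labels : List (Int × String)) (patterns : List String) :
    List (String × List (List Int)) :=
  (patterns.foldl
    (fun (d : PySem.Dict String (List (List Int))) p => d.insert p (pvSearchB graph node_labels p))
    PySem.Dict.empty).items

-- ===== PRECONDITION & SPEC =====
def Spec_graph_traversal_pattern_matching (graph : List (Int × List Int)) (node_labels : List (Int × String)) (patterns : List String) (out : List (String × List (List Int))) : Prop := out = graph_traversal_pattern_matching_alt graph node_labels patterns
instance (graph : List (Int × List Int)) (node_labels : List (Int × String)) (patterns : List String) (out : List (String × List (List Int))) : Decidable (Spec_graph_traversal_pattern_matching graph node_labels patterns out) := by unfold Spec_graph_traversal_pattern_matching; infer_instance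

-- ===== CLAIM (what is proved, stated in full; the proofs are below) =====
def Claim_equal_graph_traversal_pattern_matching : Prop := ∀ (graph : List (Int × List Int)) (node_labels : List (Int × String)) (patterns : List String), Dom_graph_traversal_pattern_matching graph node_labels patterns → Spec_graph_traversal_pattern_matching graph node_labels patterns (graph_traversal_pattern_matching graph node_labels patterns)

-- ===== LEMMAS AND PROOFS =====

-- a fold whose accumulator is a pair of independently-updated components splits in two
theorem pvPairFold {α β γ : Type} (l : List α) (g : β → α → β) (h : γ → α → γ) (b : β) (c : γ) :
    l.foldl (fun acc x => (g acc.1 x, h acc.2 x)) (b, c) = (l.foldl g b, l.foldl h c) := by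
  induction l generalizing b c with
  | nil => rfl
  | cons x xs ih => simpa using ih (g b x) (h c x)

-- pulling the accumulator out of a conditional-append fold
theorem pvFoldAppendIf {α β : Type} (l : List α) (c : α → Prop) [DecidablePred c]
    (g : α → List β) (a0 : List β) :
    l.foldl (fun acc x => if c x then acc else acc ++ g x) a0
      = a0 ++ l.foldl (fun acc x => if c x then acc else acc ++ g x) [] := by
  induction l generalizing a0 with
  | nil => simp
  | cons x xs ih =>
      simp only [List.foldl_cons]
      rw [ih, ih (if c x then [] else [] ++ g x)]
      by_cases hc : c x <;> simp [hc]

-- lookups in a fold that inserts a key-determined value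
theorem pvFoldlInsertFun {ν : Type} (l : List String) (g : String → ν)
    (d : PySem.Dict String ν) (k : String) :
    (l.foldl (fun d p => d.insert p (g p)) d).get? k
      = if k ∈ l then some (g k) else d.get? k := by
  induction l generalizing d with
  | nil => simp
  | cons p rest ih =>
      simp only [List.foldl_cons]
      rw [ih]
      by_cases hk : k ∈ rest
      · simp [hk]
      · by_cases hkp : k = p
        · subst hkp; simp [hk, PySem.Dict.get?_insert_self]
        · simp [hk, hkp, PySem.Dict.get?_insert_of_ne _ _ hkp]

def pvChain0 (cs : List Char) : List (PySem.Dict Char Nat × Bool) :=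
  cs.zipIdx.map (fun q => (PySem.Dict.empty.insert q.1 (q.2 + 1), false)) ++ [pvNode0]

def pvChain (cs : List Char) : List (PySem.Dict Char Nat × Bool) :=
  cs.zipIdx.map (fun q => (PySem.Dict.empty.insert q.1 (q.2 + 1), false)) ++ [(PySem.Dict.empty, true)]

theorem pvBuild_loop (cs : List Char) :
    cs.foldl pvBuildStep ([pvNode0], 0) = (pvChain0 cs, cs.length) := by
  induction cs using List.reverseRecOn with
  | nil => simp [pvChain0]
  | append_singleton cs c ih =>
      rw [List.foldl_append, ih]
      simp only [List.foldl_cons, List.foldl_nil]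
      unfold pvBuildStep
      simp [pvChain0, List.zipIdx_append, List.getD, pvNode0, PySem.Dict.get?_empty]

theorem pvBuildTrie_eq_chain (p : String) : pvBuildTrie p = pvChain p.toList := by
  unfold pvBuildTrie
  rw [pvBuild_loop]
  simp [pvChain0, pvChain, List.getD, pvNode0]

theorem pvChain_getD_lt (cs : List Char) (i : Nat) (h : i < cs.length) :
    (pvChain cs).getD i pvNode0 = (PySem.Dict.empty.insert cs[i] (i + 1), false) := by
  simp [pvChain, List.getD, List.getElem?_append_left, h, List.getElem_zipIdx]

theorem pvChain_getD_len (cs : List Char) :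
    (pvChain cs).getD cs.length pvNode0 = (PySem.Dict.empty, true) := by
  simp [pvChain, List.getD]

theorem pvChain_isEnd (cs : List Char) (i : Nat) (h : i ≤ cs.length) :
    ((pvChain cs).getD i pvNode0).2 = decide (i = cs.length) := by
  rcases Nat.lt_or_ge i cs.length with hlt | hge
  · rw [pvChain_getD_lt cs i hlt]; simp [Nat.ne_of_lt hlt]
  · have : i = cs.length := Nat.le_antisymm h hge
    subst this
    rw [pvChain_getD_len]; simp

theorem pvAdvance_le (cs : List Char) (pos : Nat) (label : List Char) (h : pos ≤ cs.length) :
    pvAdvance cs pos label ≤ cs.length := by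
  induction label generalizing pos with
  | nil => simpa [pvAdvance]
  | cons c rest ih =>
      unfold pvAdvance
      split
      · split
        · exact ih (pos + 1) (by omega)
        · omega
      · omega

theorem pvStepChars_eq_advance (cs : List Char) (pos : Nat) (label : List Char)
    (h : pos ≤ cs.length) : pvStepChars (pvChain cs) pos label = pvAdvance cs pos label := by
  induction label generalizing pos with
  | nil => rfl
  | cons c rest ih =>
      unfold pvStepChars pvAdvance
      rcases Nat.lt_or_ge pos cs.length with hlt | hge
      · rw [pvChain_getD_lt cs pos hlt]
        simp only [hlt, dif_pos]
        rw [PySem.Dict.get?_insert]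
        by_cases hc : cs[pos] = c
        · simp [hc, ih (pos+1) (by omega)]
        · simp [hc, Ne.symm hc, PySem.Dict.get?_empty]
      · have : pos = cs.length := Nat.le_antisymm h hge
        subst this
        rw [pvChain_getD_len]
        simp [PySem.Dict.get?_empty]

-- the 'if …: result[pattern].append(path)' loop over the states list, key by key
theorem pvResFold (st : List (String × Nat)) (r : PySem.Dict String (List (List Int)))
    (cond : String × Nat → Bool) (path : List Int)
    (hnd : (st.map Prod.fst).Nodup) (hsub : ∀ pp ∈ st, r.contains pp.1 = true) :
    (st.foldl (fun r pp => if cond pp then r.modify pp.1 [] (fun v => v ++ [path]) else r) r).keys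
        = r.keys ∧
    ∀ q, (st.foldl (fun r pp => if cond pp then r.modify pp.1 [] (fun v => v ++ [path]) else r) r).getD q []
      = r.getD q [] ++ (match (PySem.Dict.mk st).get? q with
          | some pos => if cond (q, pos) then [path] else []
          | none => []) := by
  induction st generalizing r with
  | nil => exact ⟨rfl, fun q => by simp [PySem.Dict.get?]⟩
  | cons pp rest ih =>
      simp only [List.foldl_cons, List.map_cons, List.nodup_cons] at hnd ⊢
      set r' := if cond pp then r.modify pp.1 [] (fun v => v ++ [path]) else r with hr'
      have hkeys' : r'.keys = r.keys := by
        rw [hr']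
        split
        · rw [PySem.Dict.keys_modify]
          rw [PySem.Dict.keys_insert_of_contains]
          exact hsub pp (by simp)
        · rfl
      have hsub' : ∀ q ∈ rest, r'.contains q.1 = true := by
        intro q hq
        rw [PySem.Dict.contains_eq_decide_mem_keys, hkeys',
          ← PySem.Dict.contains_eq_decide_mem_keys]
        exact hsub q (by simp [hq])
      obtain ⟨ihk, ihg⟩ := ih r' hnd.2 hsub'
      refine ⟨by rw [ihk, hkeys'], fun q => ?_⟩
      rw [ihg q, PySem.Dict.get?_mk_cons]
      by_cases hq : q = pp.1
      · have hnone : PySem.Dict.get? { items := rest } q = none := by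
          rw [PySem.Dict.get?_eq_none_iff_not_mem_keys, PySem.Dict.keys_mk]
          intro hmem
          rw [hq] at hmem
          exact hnd.1 (by simpa using hmem)
        rw [hnone]
        have hbeq : (pp.1 == q) = true := by simp [hq]
        simp only [hbeq, if_true, List.append_nil]
        have hpp : (q, pp.2) = pp := by rw [hq]
        rw [hpp, hq, hr']
        split
        · rw [PySem.Dict.getD_modify_self]
        · simp
      · have hbeq : (pp.1 == q) = false := by simp [Ne.symm hq]
        simp only [hbeq, Bool.false_eq_true, if_false]
        have : r'.getD q [] = r.getD q [] := by
          rw [hr']; split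
          · exact PySem.Dict.getD_modify_of_ne _ _ _ hq
          · rfl
        rw [this]

-- the accumulator of B's dfs factors out
theorem pvDfsB_acc (graph : List (Int × List Int)) (node_labels : List (Int × String))
    (p : List Char) (n : Nat) :
    ∀ (node : Int) (path : List Int) (pos : Nat) (out : List (List Int)),
      ((pvAllNodes graph).filter (fun x => decide (x ∉ path))).length = n →
      pvDfsB graph node_labels p node path pos out
        = out ++ pvDfsB graph node_labels p node path pos [] := by
  induction n using Nat.strong_induction_on with
  | _ n IH =>
  intro node path pos out hn
  conv_lhs => rw [pvDfsB]
  conv_rhs => rw [pvDfsB]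
  simp only [dite_eq_ite]
  rw [List.foldl_attach (f := fun (o : List (List Int)) (a : Int) =>
      if a ∈ path then o
      else pvDfsB graph node_labels p a (path ++ [a])
        (pvAdvance p pos (PySem.Dict.getD (PySem.Dict.mk node_labels) node "").toList) o),
    List.foldl_attach (f := fun (o : List (List Int)) (a : Int) =>
      if a ∈ path then o
      else pvDfsB graph node_labels p a (path ++ [a])
        (pvAdvance p pos (PySem.Dict.getD (PySem.Dict.mk node_labels) node "").toList) o)]
  have haux : ∀ (nbrs : List Int), (∀ x ∈ nbrs, x ∈ pvAllNodes graph) →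
      ∀ (o : List (List Int)),
      nbrs.foldl (fun o a =>
          if a ∈ path then o
          else pvDfsB graph node_labels p a (path ++ [a])
            (pvAdvance p pos (PySem.Dict.getD (PySem.Dict.mk node_labels) node "").toList) o) o
        = o ++ nbrs.foldl (fun o a =>
          if a ∈ path then o
          else pvDfsB graph node_labels p a (path ++ [a])
            (pvAdvance p pos (PySem.Dict.getD (PySem.Dict.mk node_labels) node "").toList) o) [] := by
    intro nbrs
    induction nbrs with
    | nil => intro _ o; simp
    | cons a rest ihn =>
        intro hmem o
        by_cases ha : a ∈ path
        · simp only [List.foldl_cons, ha, if_true]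
          exact ihn (fun x hx => hmem x (by simp [hx]))  o
        · simp only [List.foldl_cons, ha, if_false]
          have hlt : ((pvAllNodes graph).filter (fun x => decide (x ∉ path ++ [a]))).length < n := by
            rw [← hn]
            exact pvMeasure_lt graph path a (hmem a (by simp)) ha
          have hstep := IH _ hlt a (path ++ [a])
            (pvAdvance p pos (PySem.Dict.getD (PySem.Dict.mk node_labels) node "").toList) o rfl
          rw [hstep]
          rw [ihn (fun x hx => hmem x (by simp [hx]))
            (o ++ pvDfsB graph node_labels p a (path ++ [a])
              (pvAdvance p pos (PySem.Dict.getD (PySem.Dict.mk node_labels) node "").toList) [])]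
          rw [ihn (fun x hx => hmem x (by simp [hx]))
            (pvDfsB graph node_labels p a (path ++ [a])
              (pvAdvance p pos (PySem.Dict.getD (PySem.Dict.mk node_labels) node "").toList) [])]
          simp [List.append_assoc]
  rw [haux _ (fun x hx => pvGetD_subset_allNodes graph node x hx)
      (if pvAdvance p pos (PySem.Dict.getD (PySem.Dict.mk node_labels) node "").toList = p.length
        then out ++ [path] else out),
    haux _ (fun x hx => pvGetD_subset_allNodes graph node x hx)
      (if pvAdvance p pos (PySem.Dict.getD (PySem.Dict.mk node_labels) node "").toList = p.length
        then [] ++ [path] else [])]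
  by_cases hf : pvAdvance p pos (PySem.Dict.getD (PySem.Dict.mk node_labels) node "").toList = p.length
  · simp [hf, List.append_assoc]
  · simp [hf]

theorem pvDfsB_out (graph : List (Int × List Int)) (node_labels : List (Int × String))
    (p : List Char) (node : Int) (path : List Int) (pos : Nat) (out : List (List Int)) :
    pvDfsB graph node_labels p node path pos out
      = out ++ pvDfsB graph node_labels p node path pos [] :=
  pvDfsB_acc graph node_labels p _ node path pos out rfl

theorem pvDfsB_peel (graph : List (Int × List Int)) (node_labels : List (Int × String))
    (p : List Char) (node : Int) (path : List Int) (pos : Nat) :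
    pvDfsB graph node_labels p node path pos [] =
      (if pvAdvance p pos (PySem.Dict.getD (PySem.Dict.mk node_labels) node "").toList = p.length
        then [path] else []) ++
      (PySem.Dict.getD (PySem.Dict.mk graph) node []).foldl
        (fun l a => if a ∈ path then l
          else l ++ pvDfsB graph node_labels p a (path ++ [a])
            (pvAdvance p pos (PySem.Dict.getD (PySem.Dict.mk node_labels) node "").toList) []) [] := by
  conv_lhs => rw [pvDfsB]
  simp only [dite_eq_ite]
  rw [List.foldl_attach (f := fun (o : List (List Int)) (a : Int) =>
      if a ∈ path then o
      else pvDfsB graph node_labels p a (path ++ [a])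
        (pvAdvance p pos (PySem.Dict.getD (PySem.Dict.mk node_labels) node "").toList) o)]
  rw [PySem.List.foldl_congr_mem _
    (fun (o : List (List Int)) (a : Int) =>
      if a ∈ path then o
      else pvDfsB graph node_labels p a (path ++ [a])
        (pvAdvance p pos (PySem.Dict.getD (PySem.Dict.mk node_labels) node "").toList) o)
    (fun (l : List (List Int)) (a : Int) =>
      if a ∈ path then l
      else l ++ pvDfsB graph node_labels p a (path ++ [a])
        (pvAdvance p pos (PySem.Dict.getD (PySem.Dict.mk node_labels) node "").toList) []) _
    (by
      intro acc x _
      by_cases hx : x ∈ path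
      · simp [hx]
      · simp only [hx, if_false]
        exact pvDfsB_out graph node_labels p x (path ++ [x]) _ acc)]
  rw [pvFoldAppendIf]
  simp

theorem pvDfsA_factor (graph : List (Int × List Int)) (node_labels : List (Int × String))
    (tries : PySem.Dict String (List (PySem.Dict Char Nat × Bool))) (n : Nat) :
    ∀ (node : Int) (path : List Int) (states : PySem.Dict String Nat)
      (res : PySem.Dict String (List (List Int))),
      ((pvAllNodes graph).filter (fun x => decide (x ∉ path))).length = n →
      states.keys.Nodup →
      (∀ pp ∈ states.items, tries.getD pp.1 [] = pvChain pp.1.toList ∧ pp.2 ≤ pp.1.toList.length) →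
      (∀ pp ∈ states.items, res.contains pp.1 = true) →
      (pvDfsA graph node_labels tries node path states res).keys = res.keys ∧
      ∀ pp ∈ states.items,
        (pvDfsA graph node_labels tries node path states res).getD pp.1 []
          = res.getD pp.1 [] ++ pvDfsB graph node_labels pp.1.toList node path pp.2 [] := by
  induction n using Nat.strong_induction_on with
  | _ n IH =>
  intro node path states res hn hnd hgood hsub
  rw [pvDfsA]
  simp only []
  set label := (PySem.Dict.getD (PySem.Dict.mk node_labels) node "").toList with hlabel
  set step := fun (pp : String × Nat) => pvStepChars (tries.getD pp.1 []) pp.2 label with hstep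
  set cond := fun (pp : String × Nat) =>
      (((tries.getD pp.1 []).getD (step pp) pvNode0).2 : Bool) with hcond
  rw [pvPairFold states.items
    (fun ns pp => ns.insert pp.1 (step pp))
    (fun r pp => if cond pp then r.modify pp.1 [] (fun v => v ++ [path]) else r)
    PySem.Dict.empty res]
  -- the two components of the states loop
  have hndfst : (states.items.map Prod.fst).Nodup := by
    simpa [PySem.Dict.keys] using hnd
  have hNSitems : (states.items.foldl (fun ns pp => ns.insert pp.1 (step pp)) PySem.Dict.empty).items
      = states.items.map (fun pp => (pp.1, step pp)) := by
    rw [PySem.Dict.items_foldl_insert_fresh states.items Prod.fst step PySem.Dict.empty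
      (by intro a _; exact PySem.Dict.contains_empty a.1) hndfst]
    simp [PySem.Dict.empty]
  set NS := states.items.foldl (fun ns pp => ns.insert pp.1 (step pp)) PySem.Dict.empty with hNS
  obtain ⟨hR1keys, hR1get⟩ := pvResFold states.items res cond path hndfst hsub
  set R1 := states.items.foldl
      (fun r pp => if cond pp then r.modify pp.1 [] (fun v => v ++ [path]) else r) res with hR1
  -- facts about the new states
  have hstepeq : ∀ pp ∈ states.items, step pp = pvAdvance pp.1.toList pp.2 label := by
    intro pp hpp
    obtain ⟨ht, hb⟩ := hgood pp hpp
    rw [hstep]; simp only []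
    rw [ht, pvStepChars_eq_advance _ _ _ hb]
  have hsteple : ∀ pp ∈ states.items, step pp ≤ pp.1.toList.length := by
    intro pp hpp
    rw [hstepeq pp hpp]
    exact pvAdvance_le _ _ _ (hgood pp hpp).2
  have hNSkeys : NS.keys = states.keys := by
    simp [PySem.Dict.keys, hNSitems]
  have hNSgood : ∀ pp ∈ NS.items, tries.getD pp.1 [] = pvChain pp.1.toList ∧ pp.2 ≤ pp.1.toList.length := by
    rw [hNSitems]
    intro pp hpp
    obtain ⟨qq, hqq, rfl⟩ := List.mem_map.mp hpp
    exact ⟨(hgood qq hqq).1, hsteple qq hqq⟩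
  -- the neighbour loop
  have haux : ∀ (nbrs : List Int), (∀ x ∈ nbrs, x ∈ pvAllNodes graph) →
      ∀ (acc : PySem.Dict String (List (List Int))), acc.keys = res.keys →
      (nbrs.foldl (fun r a => if a ∈ path then r
          else pvDfsA graph node_labels tries a (path ++ [a]) NS r) acc).keys = acc.keys ∧
      ∀ pp ∈ states.items,
        (nbrs.foldl (fun r a => if a ∈ path then r
            else pvDfsA graph node_labels tries a (path ++ [a]) NS r) acc).getD pp.1 []
          = acc.getD pp.1 [] ++
            nbrs.foldl (fun l a => if a ∈ path then l
              else l ++ pvDfsB graph node_labels pp.1.toList a (path ++ [a]) (step pp) []) [] := by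
    intro nbrs
    induction nbrs with
    | nil => intro _ acc _; exact ⟨rfl, fun pp _ => by simp⟩
    | cons a rest ihn =>
        intro hmem acc hacck
        by_cases ha : a ∈ path
        · obtain ⟨k1, k2⟩ := ihn (fun x hx => hmem x (by simp [hx])) acc hacck
          refine ⟨by simpa [ha] using k1, fun pp hpp => ?_⟩
          have := k2 pp hpp
          simpa [ha] using this
        · have hsubNS : ∀ pp ∈ NS.items, acc.contains pp.1 = true := by
            intro pp hpp
            rw [PySem.Dict.contains_eq_decide_mem_keys, hacck]
            have : pp.1 ∈ NS.keys := by
              rw [PySem.Dict.keys]; exact List.mem_map_of_mem hpp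
            rw [hNSkeys] at this
            have : res.contains pp.1 = true := by
              rw [PySem.Dict.keys] at this
              obtain ⟨qq, hqq, h1⟩ := List.mem_map.mp this
              have := hsub qq hqq
              rwa [h1] at this
            rw [PySem.Dict.contains_eq_decide_mem_keys] at this
            exact this
          have hlt : ((pvAllNodes graph).filter (fun x => decide (x ∉ path ++ [a]))).length < n := by
            rw [← hn]
            exact pvMeasure_lt graph path a (hmem a (by simp)) ha
          obtain ⟨d1, d2⟩ := IH _ hlt a (path ++ [a]) NS acc rfl
            (by rw [hNSkeys]; exact hnd) hNSgood hsubNS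
          set acc' := pvDfsA graph node_labels tries a (path ++ [a]) NS acc with hacc'
          obtain ⟨k1, k2⟩ := ihn (fun x hx => hmem x (by simp [hx])) acc' (by rw [d1, hacck])
          refine ⟨by simpa [ha] using (k1.trans d1), fun pp hpp => ?_⟩
          have hppNS : (pp.1, step pp) ∈ NS.items := by
            rw [hNSitems]; exact List.mem_map_of_mem hpp
          have hd2 := d2 (pp.1, step pp) hppNS
          have hk2 := k2 pp hpp
          simp only [ha, if_false, List.foldl_cons]
          rw [hk2, hd2]
          rw [pvFoldAppendIf rest (fun x => x ∈ path)
            (fun x => pvDfsB graph node_labels pp.1.toList x (path ++ [x]) (step pp) [])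
            ([] ++ pvDfsB graph node_labels pp.1.toList a (path ++ [a]) (step pp) [])]
          simp
  simp only [dite_eq_ite]
  rw [List.foldl_attach (f := fun (r : PySem.Dict String (List (List Int))) (a : Int) =>
    if a ∈ path then r else pvDfsA graph node_labels tries a (path ++ [a]) NS r)]
  obtain ⟨f1, f2⟩ := haux (PySem.Dict.getD (PySem.Dict.mk graph) node [])
    (fun x hx => pvGetD_subset_allNodes graph node x hx) R1 hR1keys
  refine ⟨f1.trans hR1keys, fun pp hpp => ?_⟩
  rw [f2 pp hpp, hR1get pp.1]
  rw [pvDfsB_peel]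
  have hget : (PySem.Dict.mk states.items).get? pp.1 = some pp.2 :=
    PySem.Dict.get?_of_mem_items states hpp hnd
  rw [hget]
  have hc : cond (pp.1, pp.2) = decide (step pp = pp.1.toList.length) := by
    show ((tries.getD pp.1 []).getD (step (pp.1, pp.2)) pvNode0).2 = _
    have heta : step (pp.1, pp.2) = step pp := rfl
    rw [heta, (hgood pp hpp).1]
    exact pvChain_isEnd _ _ (hsteple pp hpp)
  rw [← hlabel, ← hstepeq pp hpp]
  simp [hc, List.append_assoc]

-- ===== VERDICT =====
theorem graph_traversal_pattern_matching_spec : Claim_equal_graph_traversal_pattern_matching := by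
  unfold Claim_equal_graph_traversal_pattern_matching
  intro graph node_labels patterns _dom
  unfold Spec_graph_traversal_pattern_matching
  unfold graph_traversal_pattern_matching graph_traversal_pattern_matching_alt
  dsimp only
  set tries := patterns.foldl
    (fun (d : PySem.Dict String (List (PySem.Dict Char Nat × Bool))) p => d.insert p (pvBuildTrie p))
    PySem.Dict.empty with htries
  set res0 := patterns.foldl
    (fun (d : PySem.Dict String (List (List Int))) p => d.insert p []) PySem.Dict.empty with hres0
  set resB := patterns.foldl
    (fun (d : PySem.Dict String (List (List Int))) p => d.insert p (pvSearchB graph node_labels p))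
    PySem.Dict.empty with hresB
  have htget : ∀ k, tries.get? k = if k ∈ patterns then some (pvBuildTrie k) else none := by
    intro k; rw [htries, pvFoldlInsertFun]; simp
  have hrget : ∀ k, res0.get? k = if k ∈ patterns then some [] else none := by
    intro k; rw [hres0, pvFoldlInsertFun]; simp
  have hbget : ∀ k, resB.get? k = if k ∈ patterns then some (pvSearchB graph node_labels k) else none := by
    intro k; rw [hresB, pvFoldlInsertFun]; simp
  have hkt : tries.keys = PySem.Set.update ([] : List String) patterns := by
    rw [htries, PySem.Dict.keys_foldl_insert]; rfl
  have hkr : res0.keys = PySem.Set.update ([] : List String) patterns := by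
    rw [hres0, PySem.Dict.keys_foldl_insert]; rfl
  have hkb : resB.keys = PySem.Set.update ([] : List String) patterns := by
    rw [hresB, PySem.Dict.keys_foldl_insert]; rfl
  have hndr : res0.keys.Nodup := by
    rw [hres0]; exact PySem.Dict.nodup_keys_foldl_insert _ _ _ (by simp)
  have hndb : resB.keys.Nodup := by
    rw [hresB]; exact PySem.Dict.nodup_keys_foldl_insert _ _ _ (by simp)
  have hndt : tries.keys.Nodup := by
    rw [htries]; exact PySem.Dict.nodup_keys_foldl_insert _ _ _ (by simp)
  have hmemt : ∀ k ∈ tries.keys, k ∈ patterns := by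
    intro k hk
    by_contra hkp
    have := htget k
    rw [if_neg hkp, PySem.Dict.get?_eq_none_iff_not_mem_keys] at this
    exact this hk
  -- the per-start loop
  set states0 := PySem.Dict.mk (tries.items.map (fun pt => (pt.1, 0))) with hstates0
  have hs0items : states0.items = tries.items.map (fun pt => (pt.1, 0)) := rfl
  have hs0keys : states0.keys = tries.keys := by
    rw [PySem.Dict.keys, hs0items, PySem.Dict.keys]
    simp
  have hs0mem : ∀ k ∈ tries.keys, (k, 0) ∈ states0.items := by
    intro k hk
    rw [PySem.Dict.keys] at hk
    obtain ⟨pt, hpt, h1⟩ := List.mem_map.mp hk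
    rw [hs0items]
    exact List.mem_map.mpr ⟨pt, hpt, by rw [h1]⟩
  have hs0good : ∀ pp ∈ states0.items,
      tries.getD pp.1 [] = pvChain pp.1.toList ∧ pp.2 ≤ pp.1.toList.length := by
    intro pp hpp
    rw [hs0items] at hpp
    obtain ⟨pt, hpt, rfl⟩ := List.mem_map.mp hpp
    constructor
    · have hkp : pt.1 ∈ patterns := hmemt pt.1 (by rw [PySem.Dict.keys]; exact List.mem_map_of_mem hpt)
      rw [PySem.Dict.getD_eq_get?_getD, htget pt.1, if_pos hkp]
      simp [pvBuildTrie_eq_chain]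
    · exact Nat.zero_le _
  have hstart : ∀ (gl : List (Int × List Int)) (res : PySem.Dict String (List (List Int))),
      res.keys = res0.keys →
      (gl.foldl (fun res st => pvDfsA graph node_labels tries st.1 [st.1] states0 res) res).keys
        = res.keys ∧
      ∀ k ∈ tries.keys,
        (gl.foldl (fun res st => pvDfsA graph node_labels tries st.1 [st.1] states0 res) res).getD k []
          = res.getD k [] ++ gl.flatMap (fun st => pvDfsB graph node_labels k.toList st.1 [st.1] 0 []) := by
    intro gl
    induction gl with
    | nil => intro res _; exact ⟨rfl, fun k _ => by simp⟩
    | cons st rest ihg =>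
        intro res hrk
        have hsubs : ∀ pp ∈ states0.items, res.contains pp.1 = true := by
          intro pp hpp
          rw [PySem.Dict.contains_eq_decide_mem_keys, hrk, hkr, ← hkt]
          simp only [decide_eq_true_eq]
          rw [hs0items] at hpp
          obtain ⟨pt, hpt, rfl⟩ := List.mem_map.mp hpp
          rw [PySem.Dict.keys]
          exact List.mem_map_of_mem hpt
        obtain ⟨d1, d2⟩ := pvDfsA_factor graph node_labels tries _ st.1 [st.1] states0 res rfl
          (by rw [hs0keys]; exact hndt) hs0good hsubs
        set res' := pvDfsA graph node_labels tries st.1 [st.1] states0 res with hres'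
        obtain ⟨k1, k2⟩ := ihg res' (by rw [d1, hrk])
        refine ⟨by simpa using (k1.trans d1), fun k hk => ?_⟩
        simp only [List.foldl_cons, List.flatMap_cons]
        rw [k2 k hk, d2 (k, 0) (hs0mem k hk)]
        simp [List.append_assoc]
  obtain ⟨s1, s2⟩ := hstart graph res0 rfl
  rw [PySem.Dict.items_eq_map_keys
      (graph.foldl (fun res st => pvDfsA graph node_labels tries st.1 [st.1] states0 res) res0)
      (by rw [s1]; exact hndr) [],
    PySem.Dict.items_eq_map_keys resB hndb [], s1, hkr, hkb]
  apply List.map_congr_left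
  intro k hk
  have hkt' : k ∈ tries.keys := by rw [hkt]; exact hk
  have hkp : k ∈ patterns := hmemt k hkt'
  rw [s2 k hkt']
  have hr0 : res0.getD k [] = [] := by
    rw [PySem.Dict.getD_eq_get?_getD, hrget k, if_pos hkp]; rfl
  have hrB : resB.getD k [] = pvSearchB graph node_labels k := by
    rw [PySem.Dict.getD_eq_get?_getD, hbget k, if_pos hkp]; rfl
  rw [hr0, hrB]
  unfold pvSearchB
  rw [PySem.List.foldl_congr_mem graph
    (fun (out : List (List Int)) (st : Int × List Int) =>
      pvDfsB graph node_labels k.toList st.1 [st.1] 0 out)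
    (fun (out : List (List Int)) (st : Int × List Int) =>
      out ++ pvDfsB graph node_labels k.toList st.1 [st.1] 0 []) []
    (fun acc st _ => pvDfsB_out graph node_labels k.toList st.1 [st.1] 0 acc)]
  rw [PySem.List.foldl_append_eq_flatMap]
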